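-- pv_equiv track=rewrite | github.com/Mavhawk64/partition_nums_py | partition-nums.py | odd_and_count_arr
-- ===== SOURCE A (Python) =====
-- def odd_and_count_arr(n):
-- 	a = []
-- 	odd = 3
-- 	count = 1
-- 	for i in range(0, n):
-- 		if i % 2 == 0:
-- 			a.append(count)
-- 			count += 1
-- 		else:
-- 			a.append(odd)
-- 			odd += 2
-- 	return a
-- ===== SOURCE B (Python) =====
-- def odd_and_count_arr(n):
-- 	counts = list(range(1, (n + 1) // 2 + 1))
-- 	odds = list(range(3, 3 + 2 * (n // 2), 2))
-- 	a = []
-- 	for c, o in zip(counts, odds):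
-- 		a.append(c)
-- 		a.append(o)
-- 	if len(counts) > len(odds):
-- 		a.append(counts[-1])
-- 	return a
-- ===== Notes on version B (the rewrite author's own statement) =====
-- stated objective: alternative
-- what changed: B precomputes the counter and odd subsequences as two arithmetic ranges and interleaves them with a zip loop (plus a leftover append for odd n), instead of A's single loop with a per-index parity branch and two mutable counters.
import Mathlib
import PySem

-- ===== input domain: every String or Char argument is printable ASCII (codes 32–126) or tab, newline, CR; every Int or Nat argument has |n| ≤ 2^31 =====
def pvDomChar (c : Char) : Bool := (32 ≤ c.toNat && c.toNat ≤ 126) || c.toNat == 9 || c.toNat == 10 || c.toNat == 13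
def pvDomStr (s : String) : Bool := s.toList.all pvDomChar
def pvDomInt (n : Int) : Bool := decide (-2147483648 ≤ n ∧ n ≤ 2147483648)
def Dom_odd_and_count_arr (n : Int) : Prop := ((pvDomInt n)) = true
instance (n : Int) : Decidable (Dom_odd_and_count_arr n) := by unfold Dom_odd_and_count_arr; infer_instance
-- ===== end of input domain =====

-- B replaces A's single parity-branch loop with two precomputed arithmetic ranges
-- interleaved by a zip loop (alternative decomposition, same O(n) cost).

-- ===== PORT A =====
-- loop body of A's for-loop: state = (a reversed, odd, count); list.append is O(1) in
-- Python, so the growing list is kept reversed (cons) and reversed once at the end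
def pvStepA (st : List Int × Int × Int) (i : Int) : List Int × Int × Int :=
  if PySem.Int.mod i 2 == 0 then (st.2.2 :: st.1, st.2.1, st.2.2 + 1)
  else (st.2.1 :: st.1, st.2.1 + 2, st.2.2)

def odd_and_count_arr (n : Int) : List Int :=
  (((PySem.List.pyRange 0 n 1).foldl pvStepA ([], 3, 1)).1).reverse

-- ===== PORT B =====
-- the zip loop's appends likewise keep the result reversed until the end
def odd_and_count_arr_alt (n : Int) : List Int :=
  let counts := PySem.List.pyRange 1 (PySem.Int.floordiv (n + 1) 2 + 1) 1
  let odds := PySem.List.pyRange 3 (3 + 2 * PySem.Int.floordiv n 2) 2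
  let a := (counts.zip odds).foldl (fun acc co => co.2 :: co.1 :: acc) []
  -- counts[-1]: the guard makes counts nonempty, where getLastD 0 is exactly Python's counts[-1]
  if counts.length > odds.length then (counts.getLastD 0 :: a).reverse else a.reverse

-- ===== PRECONDITION & SPEC =====
def Spec_odd_and_count_arr (n : Int) (out : List Int) : Prop := out = odd_and_count_arr_alt n
instance (n : Int) (out : List Int) : Decidable (Spec_odd_and_count_arr n out) := by unfold Spec_odd_and_count_arr; infer_instance

-- ===== CLAIM (what is proved, stated in full; the proofs are below) =====
def Claim_equal_odd_and_count_arr : Prop := ∀ (n : Int), Dom_odd_and_count_arr n → Spec_odd_and_count_arr n (odd_and_count_arr n)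

-- ===== LEMMAS AND PROOFS =====

-- the common interleaved value: [1, 3, 2, 5, ...] with m pairs
def pvT (m : Nat) : List Int := (List.range m).flatMap (fun k : Nat => [1 + (k : Int), 3 + 2 * (k : Int)])

lemma pvT_succ (m : Nat) : pvT (m + 1) = pvT m ++ [1 + (m : Int), 3 + 2 * (m : Int)] := by
  simp [pvT, List.range_succ]

lemma pvStepA_even (st : List Int × Int × Int) (m : Nat) :
    pvStepA st (2 * (m : Int)) = (st.2.2 :: st.1, st.2.1, st.2.2 + 1) := by
  have h : PySem.Int.mod (2 * (m : Int)) 2 = 0 := by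
    rw [PySem.Int.mod_eq_emod_of_pos (by norm_num)]; omega
  unfold pvStepA
  rw [h]
  simp

lemma pvStepA_odd (st : List Int × Int × Int) (m : Nat) :
    pvStepA st (2 * (m : Int) + 1) = (st.2.1 :: st.1, st.2.1 + 2, st.2.2) := by
  have h : PySem.Int.mod (2 * (m : Int) + 1) 2 = 1 := by
    rw [PySem.Int.mod_eq_emod_of_pos (by norm_num)]; omega
  unfold pvStepA
  rw [h]
  simp

lemma Astate (m : Nat) :
    (PySem.List.pyRange 0 (2 * (m : Int)) 1).foldl pvStepA ([], 3, 1)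
      = ((pvT m).reverse, 3 + 2 * (m : Int), (m : Int) + 1) := by
  induction m with
  | zero => simp [pvT]
  | succ m ih =>
      have h2 : (2 * ((↑(m + 1) : Int))) = (2 * (m : Int) + 1) + 1 := by push_cast; ring
      rw [h2, PySem.List.pyRange_one_succ_right (by omega),
        PySem.List.pyRange_one_succ_right (by omega), List.foldl_append, List.foldl_append, ih]
      simp only [List.foldl_cons, List.foldl_nil, pvStepA_even, pvStepA_odd, pvT_succ]
      refine Prod.ext ?_ (Prod.ext ?_ ?_) <;> push_cast <;> ring_nf
      simp

lemma A_even (m : Nat) : odd_and_count_arr (2 * (m : Int)) = pvT m := by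
  unfold odd_and_count_arr
  rw [Astate]
  simp

lemma A_odd (m : Nat) : odd_and_count_arr (2 * (m : Int) + 1) = pvT m ++ [(m : Int) + 1] := by
  unfold odd_and_count_arr
  rw [PySem.List.pyRange_one_succ_right (by omega), List.foldl_append, Astate]
  simp only [List.foldl_cons, List.foldl_nil, pvStepA_even]
  simp

-- zeta-reduced unfolding of port B (definitional)
lemma B_unfold (n : Int) : odd_and_count_arr_alt n =
    (if (PySem.List.pyRange 1 (PySem.Int.floordiv (n + 1) 2 + 1) 1).length
        > (PySem.List.pyRange 3 (3 + 2 * PySem.Int.floordiv n 2) 2).length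
     then ((PySem.List.pyRange 1 (PySem.Int.floordiv (n + 1) 2 + 1) 1).getLastD 0 ::
            ((PySem.List.pyRange 1 (PySem.Int.floordiv (n + 1) 2 + 1) 1).zip
              (PySem.List.pyRange 3 (3 + 2 * PySem.Int.floordiv n 2) 2)).foldl
                (fun acc co => co.2 :: co.1 :: acc) []).reverse
     else (((PySem.List.pyRange 1 (PySem.Int.floordiv (n + 1) 2 + 1) 1).zip
            (PySem.List.pyRange 3 (3 + 2 * PySem.Int.floordiv n 2) 2)).foldl
              (fun acc co => co.2 :: co.1 :: acc) []).reverse) := by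
  unfold odd_and_count_arr_alt
  dsimp only

-- the reversed-accumulator zip loop is the reversed interleaving
lemma foldl_cons2 (l : List (Int × Int)) (acc : List Int) :
    l.foldl (fun acc co => co.2 :: co.1 :: acc) acc
      = (l.flatMap (fun co => [co.1, co.2])).reverse ++ acc := by
  induction l generalizing acc with
  | nil => simp
  | cons x xs ih => simp [ih]

lemma odds_eq (m : Nat) :
    PySem.List.pyRange 3 (3 + 2 * (m : Int)) 2 = (List.range m).map (fun k : Nat => 3 + 2 * (k : Int)) := by
  rw [PySem.List.pyRange_of_pos _ _ (by norm_num)]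
  by_cases h : (3 : Int) < 3 + 2 * (m : Int)
  · rw [if_pos h]
    have : ((3 + 2 * (m : Int) - 3 + 2 - 1) / 2).toNat = m := by omega
    rw [this]
  · rw [if_neg h]
    have : m = 0 := by omega
    simp [this]

lemma counts_eq (m : Nat) :
    PySem.List.pyRange 1 ((m : Int) + 1) 1 = (List.range m).map (fun k : Nat => 1 + (k : Int)) := by
  rw [PySem.List.pyRange_one]
  have : ((m : Int) + 1 - 1).toNat = m := by omega
  rw [this]

lemma B_even (m : Nat) : odd_and_count_arr_alt (2 * (m : Int)) = pvT m := by
  have hc : PySem.Int.floordiv (2 * (m : Int) + 1) 2 + 1 = (m : Int) + 1 := by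
    rw [PySem.Int.floordiv_eq_ediv_of_pos (by norm_num)]; omega
  have ho : PySem.Int.floordiv (2 * (m : Int)) 2 = (m : Int) := by
    rw [PySem.Int.floordiv_eq_ediv_of_pos (by norm_num)]; omega
  rw [B_unfold, hc, ho, counts_eq, odds_eq, List.zip_map']
  rw [foldl_cons2]
  rw [if_neg (by simp)]
  simp [pvT, List.flatMap_map]

lemma B_odd (m : Nat) : odd_and_count_arr_alt (2 * (m : Int) + 1) = pvT m ++ [(m : Int) + 1] := by
  have hc : PySem.Int.floordiv (2 * (m : Int) + 1 + 1) 2 + 1 = ((m + 1 : Nat) : Int) + 1 := by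
    rw [PySem.Int.floordiv_eq_ediv_of_pos (by norm_num)]; push_cast; omega
  have ho : PySem.Int.floordiv (2 * (m : Int) + 1) 2 = (m : Int) := by
    rw [PySem.Int.floordiv_eq_ediv_of_pos (by norm_num)]; omega
  rw [B_unfold, hc, ho, counts_eq, odds_eq, List.range_succ, List.map_append, List.map_singleton]
  have hzip : ((List.range m).map (fun k : Nat => 1 + (k : Int)) ++ [1 + (m : Int)]).zip
      ((List.range m).map (fun k : Nat => 3 + 2 * (k : Int)))
      = ((List.range m).map (fun k : Nat => 1 + (k : Int))).zip
        ((List.range m).map (fun k : Nat => 3 + 2 * (k : Int))) := by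
    have h := List.zip_append (l₁ := (List.range m).map (fun k : Nat => 1 + (k : Int)))
      (r₁ := [1 + (m : Int)])
      (l₂ := (List.range m).map (fun k : Nat => 3 + 2 * (k : Int)))
      (r₂ := ([] : List Int)) (by simp)
    simpa using h
  rw [hzip, List.zip_map']
  rw [foldl_cons2]
  rw [if_pos (by simp), List.getLastD_concat]
  simp [pvT, List.flatMap_map]
  ring

lemma B_nonpos (n : Int) (h : n ≤ 0) : odd_and_count_arr_alt n = [] := by
  have hc : PySem.List.pyRange 1 (PySem.Int.floordiv (n + 1) 2 + 1) 1 = [] := by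
    rw [PySem.Int.floordiv_eq_ediv_of_pos (by norm_num)]
    exact PySem.List.pyRange_one_eq_nil (by omega)
  have ho : PySem.List.pyRange 3 (3 + 2 * PySem.Int.floordiv n 2) 2 = [] := by
    rw [PySem.Int.floordiv_eq_ediv_of_pos (by norm_num)]
    rw [PySem.List.pyRange_of_pos _ _ (by norm_num)]
    rw [if_neg (by omega)]
    simp
  rw [B_unfold, hc, ho]
  simp

-- ===== VERDICT (by name: the statement is the Claim_ definition above) =====
theorem odd_and_count_arr_spec : Claim_equal_odd_and_count_arr := by
  intro n _
  unfold Spec_odd_and_count_arr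
  by_cases h : n ≤ 0
  · rw [B_nonpos n h]
    unfold odd_and_count_arr
    rw [PySem.List.pyRange_one]
    have h0 : (n - 0).toNat = 0 := by omega
    rw [h0]
    simp
  · rcases Nat.even_or_odd n.toNat with ⟨m, hm⟩ | ⟨m, hm⟩
    · have hn : n = 2 * (m : Int) := by omega
      rw [hn, A_even, B_even]
    · have hn : n = 2 * (m : Int) + 1 := by omega
      rw [hn, A_odd, B_odd]
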